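-- pv_equiv track=rewrite | github.com/iiTzDew/OREGO.lk | orego-hospital-system/backend/app/utils/validators.py | validate_resource_data
-- ===== SOURCE A (Python) =====
-- def validate_resource_data(data):
--     """
--     Validate resource registration data
--     Returns (is_valid, error_message)
--     """
--     errors = []
--
--     required_fields = ['type', 'name']
--     for field in required_fields:
--         if field not in data or not data[field]:
--             errors.append(f'{field} is required')
--
--     if 'type' in data:
--         valid_types = ['bed', 'operation_theatre', 'machine']
--         if data['type'] not in valid_types:
--             errors.append(f'Type must be one of: {", ".join(valid_types)}')
--
--         # Type-specific validation
--         if data['type'] == 'bed':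
--             if not data.get('bed_number'):
--                 errors.append('Bed number is required for beds')
--
--         elif data['type'] == 'operation_theatre':
--             if not data.get('ot_number'):
--                 errors.append('OT number is required for operation theatres')
--
--         elif data['type'] == 'machine':
--             if not data.get('serial_number'):
--                 errors.append('Serial number is required for machines')
--
--     if errors:
--         return False, ', '.join(errors)
--
--     return True, None
-- ===== SOURCE B (Python) =====
-- def validate_resource_data(data):
--     """Declarative check table: every (condition, message) pair in one list, filtered once."""
--     t = data.get('type', '')
--     spec = {
--         'bed': ('bed_number', 'Bed number is required for beds'),
--         'operation_theatre': ('ot_number', 'OT number is required for operation theatres'),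
--         'machine': ('serial_number', 'Serial number is required for machines'),
--     }
--     checks = [
--         (not data.get('type'), 'type is required'),
--         (not data.get('name'), 'name is required'),
--         ('type' in data and t not in spec,
--          'Type must be one of: bed, operation_theatre, machine'),
--     ] + [('type' in data and t == k and not data.get(f), m)
--          for k, (f, m) in spec.items()]
--     errors = [m for bad, m in checks if bad]
--     if errors:
--         return False, ', '.join(errors)
--     return True, None
-- ===== Notes on version B (the rewrite author's own statement) =====
-- stated objective: idiomatic
-- what changed: Replaces A's imperative required-field loop and if/elif type dispatch with a single declarative list of (condition, message) checks, built from a spec table of the three types, filtered once to collect the errors.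
import Mathlib
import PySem

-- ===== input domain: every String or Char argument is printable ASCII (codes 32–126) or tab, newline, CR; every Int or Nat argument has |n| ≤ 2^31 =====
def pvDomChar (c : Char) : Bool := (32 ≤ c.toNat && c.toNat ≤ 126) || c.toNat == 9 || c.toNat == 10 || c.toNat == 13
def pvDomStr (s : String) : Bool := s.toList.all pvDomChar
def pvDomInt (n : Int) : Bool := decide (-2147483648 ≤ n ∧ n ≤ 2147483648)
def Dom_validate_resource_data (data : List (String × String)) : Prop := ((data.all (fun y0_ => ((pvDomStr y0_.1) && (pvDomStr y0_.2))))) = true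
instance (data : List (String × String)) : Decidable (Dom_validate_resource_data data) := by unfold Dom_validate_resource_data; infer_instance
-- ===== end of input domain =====

-- B replaces A's imperative if/elif validation with a declarative (condition, message) check table filtered once (objective: idiomatic; same cost).

-- ===== PORT A =====
def validate_resource_data (data : List (String × String)) : Bool × Option String :=
  let d := PySem.Dict.mk data
  let errors : List String := []
  let errors := ["type", "name"].foldl (fun errors field =>
    if !(d.contains field) || (d.getD field "" == "") then
      errors ++ [field ++ " is required"] else errors) errors
  let errors :=
    if d.contains "type" then
      let valid_types := ["bed", "operation_theatre", "machine"]
      let t := d.getD "type" ""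
      let errors := if !(valid_types.contains t) then
          errors ++ ["Type must be one of: " ++ PySem.Str.join ", " valid_types] else errors
      let errors :=
        if t == "bed" then
          (if d.getD "bed_number" "" == "" then errors ++ ["Bed number is required for beds"] else errors)
        else if t == "operation_theatre" then
          (if d.getD "ot_number" "" == "" then errors ++ ["OT number is required for operation theatres"] else errors)
        else if t == "machine" then
          (if d.getD "serial_number" "" == "" then errors ++ ["Serial number is required for machines"] else errors)
        else errors
      errors
    else errors
  if errors ≠ [] then (false, some (PySem.Str.join ", " errors)) else (true, none)

-- ===== PORT B =====
def validate_resource_data_alt (data : List (String × String)) : Bool × Option String :=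
  let d := PySem.Dict.mk data
  let t := d.getD "type" ""
  let spec : List (String × String × String) :=
    [("bed", "bed_number", "Bed number is required for beds"),
     ("operation_theatre", "ot_number", "OT number is required for operation theatres"),
     ("machine", "serial_number", "Serial number is required for machines")]
  let checks : List (Bool × String) :=
    [(d.getD "type" "" == "", "type is required"),
     (d.getD "name" "" == "", "name is required"),
     (d.contains "type" && !(spec.any (fun p => t == p.1)),
      "Type must be one of: bed, operation_theatre, machine")]
    ++ spec.map (fun p => (d.contains "type" && t == p.1 && (d.getD p.2.1 "" == ""), p.2.2))
  let errors := (checks.filter (·.1)).map (·.2)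
  if errors ≠ [] then (false, some (PySem.Str.join ", " errors)) else (true, none)

-- ===== PRECONDITION & SPEC =====
def Spec_validate_resource_data (data : List (String × String)) (out : Bool × Option String) : Prop := out = validate_resource_data_alt data
instance (data : List (String × String)) (out : Bool × Option String) : Decidable (Spec_validate_resource_data data out) := by unfold Spec_validate_resource_data; infer_instance

-- ===== CLAIM (what is proved, stated in full; the proofs are below) =====
def Claim_equal_validate_resource_data : Prop := ∀ (data : List (String × String)), Dom_validate_resource_data data → Spec_validate_resource_data data (validate_resource_data data)

-- ===== LEMMAS AND PROOFS =====
theorem pv_join_types :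
    "Type must be one of: " ++ PySem.Str.join ", " ["bed", "operation_theatre", "machine"] =
      "Type must be one of: bed, operation_theatre, machine" := by decide

theorem pv_missing_or_empty (o : Option String) :
    (!o.isSome || (o.getD "" == "")) = (o.getD "" == "") := by
  cases o <;> simp

-- ===== VERDICT (by name: the statement is the Claim_ definition above) =====
theorem validate_resource_data_spec : Claim_equal_validate_resource_data := by
  intro data _
  unfold Spec_validate_resource_data validate_resource_data validate_resource_data_alt
  simp only [PySem.Dict.contains_eq_isSome_get?, PySem.Dict.getD_eq_get?_getD,
    List.foldl_cons, List.foldl_nil, List.map_cons, List.map_nil, List.cons_append,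
    List.nil_append, pv_missing_or_empty, pv_join_types]
  generalize (PySem.Dict.mk data).get? "type" = o
  generalize ((PySem.Dict.mk data).get? "name").getD "" = vn
  generalize ((PySem.Dict.mk data).get? "bed_number").getD "" = vb
  generalize ((PySem.Dict.mk data).get? "ot_number").getD "" = vo
  generalize ((PySem.Dict.mk data).get? "serial_number").getD "" = vs
  cases o with
  | none => by_cases hn : vn = "" <;> simp [hn]
  | some t =>
    by_cases hn : vn = "" <;> by_cases h0 : t = "" <;>
      by_cases h1 : t = "bed" <;> by_cases h2 : t = "operation_theatre" <;>
      by_cases h3 : t = "machine" <;>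
      by_cases hb : vb = "" <;> by_cases ho : vo = "" <;> by_cases hs : vs = "" <;>
      simp_all
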